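-- pv_equiv track=rewrite | github.com/guillemotmoussu/PX111I | Chess.py | MoveQueen
-- ===== SOURCE A (Python) =====
-- def MoveQueen(actualcoords, coords, ChessBoard, Movedone):
--     EmptyTiles = False      #vérifie que toutes les cases sur la ligne, diagonale ou colonne de déplacement sont libres
--     if coords[0] - actualcoords[0] == coords[1] - actualcoords[1] and coords[0] < actualcoords[0]:
--         EmptyTiles = True
--         for index in range(coords[0]+1, actualcoords[0]):
--             if ChessBoard[index][coords[1]-coords[0]+index] != "   ":
--                 EmptyTiles = False
--     if coords[0] - actualcoords[0] == coords[1] - actualcoords[1] and coords[0] > actualcoords[0]: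
--         EmptyTiles = True
--         for index in range(actualcoords[0]+1, coords[0]):
--             if ChessBoard[index][actualcoords[1]-actualcoords[0]+index] != "   ":
--                 EmptyTiles = False
--     if coords[0] - actualcoords[0] == actualcoords[1] - coords[1] and coords[0] < actualcoords[0]:
--         EmptyTiles = True
--         for index in range(coords[0]+1, actualcoords[0]):
--             if ChessBoard[index][coords[1]+coords[0]-index] != "   ":
--                 EmptyTiles = False
--     if coords[0] - actualcoords[0] == actualcoords[1] - coords[1] and coords[0] > actualcoords[0]:
--         EmptyTiles = True
--         for index in range(actualcoords[0]+1, coords[0]):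
--             if ChessBoard[index][actualcoords[1]+actualcoords[0]-index] != "   ":
--                 EmptyTiles = False
--     if coords[0] < actualcoords[0] and coords[1] == actualcoords[1]:
--         EmptyTiles = True
--         for index in range(coords[0]+1, actualcoords[0]):
--             if ChessBoard[index][actualcoords[1]] != "   ":
--                 EmptyTiles = False
--     if coords[0] > actualcoords[0] and coords[1] == actualcoords[1]:
--         EmptyTiles = True
--         for index in range(actualcoords[0]+1, coords[0]):
--             if ChessBoard[index][actualcoords[1]] != "   ":
--                 EmptyTiles = False
--     if coords[0] == actualcoords[0] and coords[1] < actualcoords[1]: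
--         EmptyTiles = True
--         for index in range(coords[1]+1, actualcoords[1]):
--             if ChessBoard[actualcoords[0]][index] != "   ":
--                 EmptyTiles = False
--     if coords[0] == actualcoords[0] and coords[1] > actualcoords[1]:
--         EmptyTiles = True
--         for index in range(actualcoords[1]+1, coords[1]):
--             if ChessBoard[actualcoords[0]][index] != "   ":
--                 EmptyTiles = False
--     if EmptyTiles is True:  #si le trajet est libre, déplacement normal
--         ChessBoard[coords[0]][coords[1]] = ChessBoard[actualcoords[0]][actualcoords[1]]
--         ChessBoard[actualcoords[0]][actualcoords[1]] = "   "
--         Movedone = True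
--     return (ChessBoard, Movedone)
-- ===== SOURCE B (Python) =====
-- def _sign(d):
--     return (d > 0) - (d < 0)
--
-- def MoveQueen(actualcoords, coords, ChessBoard, Movedone):
--     # Single direction-vector walk instead of eight copied branch/loop pairs.
--     ar, ac = actualcoords
--     tr, tc = coords
--     dr, dc = tr - ar, tc - ac
--     sr, sc = _sign(dr), _sign(dc)
--     legal = (dr, dc) != (0, 0) and (dr == 0 or dc == 0 or abs(dr) == abs(dc))
--     if legal:
--         steps = max(abs(dr), abs(dc))
--         clear = True
--         for k in range(1, steps):
--             if ChessBoard[ar + k * sr][ac + k * sc] != "   ":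
--                 clear = False
--         if clear:
--             ChessBoard[tr][tc] = ChessBoard[ar][ac]
--             ChessBoard[ar][ac] = "   "
--             Movedone = True
--     return (ChessBoard, Movedone)
-- ===== Notes on version B (the rewrite author's own statement) =====
-- stated objective: simpler
-- what changed: Replaces the eight copied condition/loop pairs by one sign-vector (dr,dc)->(sr,sc) legality test and a single walk along the line checking intermediate tiles.
import Mathlib
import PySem

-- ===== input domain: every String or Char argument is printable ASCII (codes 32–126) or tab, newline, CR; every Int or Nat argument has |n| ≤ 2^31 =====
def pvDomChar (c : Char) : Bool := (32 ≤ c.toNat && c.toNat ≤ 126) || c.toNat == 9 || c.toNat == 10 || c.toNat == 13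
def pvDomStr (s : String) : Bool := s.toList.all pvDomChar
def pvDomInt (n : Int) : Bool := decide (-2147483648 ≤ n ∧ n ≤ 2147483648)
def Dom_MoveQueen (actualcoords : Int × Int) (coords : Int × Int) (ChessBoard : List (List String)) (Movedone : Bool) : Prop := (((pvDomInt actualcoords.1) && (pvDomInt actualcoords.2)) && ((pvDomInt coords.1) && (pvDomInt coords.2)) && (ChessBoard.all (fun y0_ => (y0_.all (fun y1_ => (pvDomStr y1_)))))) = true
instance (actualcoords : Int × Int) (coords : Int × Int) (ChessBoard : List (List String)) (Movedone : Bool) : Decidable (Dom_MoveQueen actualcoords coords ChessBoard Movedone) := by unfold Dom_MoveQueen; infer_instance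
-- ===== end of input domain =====

-- B replaces A's eight copied branch/loop pairs by one sign-vector legality test and a
-- single walk along the line (objective: simpler). Both Pythons mutate ChessBoard in
-- place identically; the equivalence proved here is about the return value.

-- board[r][c] as Python reads it (total form; Pre_ keeps every access in range)
def pvTile (b : List (List String)) (r c : Int) : String :=
  PySem.List.pyGetD (PySem.List.pyGetD b r []) c ""

-- board[r][c] = v as Python writes it (total form; Pre_ keeps every access in range)
def pvPut (b : List (List String)) (r c : Int) (v : String) : List (List String) :=
  PySem.List.pySetD b r (PySem.List.pySetD (PySem.List.pyGetD b r []) c v)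

-- ===== PORT A =====
def MoveQueen (actualcoords : Int × Int) (coords : Int × Int) (ChessBoard : List (List String)) (Movedone : Bool) : List (List String) × Bool :=
  let E0 := false
  let E1 := if coords.1 - actualcoords.1 = coords.2 - actualcoords.2 ∧ coords.1 < actualcoords.1 then
      (PySem.List.pyRange (coords.1 + 1) actualcoords.1 1).foldl
        (fun e idx => if pvTile ChessBoard idx (coords.2 - coords.1 + idx) ≠ "   " then false else e) true
    else E0
  let E2 := if coords.1 - actualcoords.1 = coords.2 - actualcoords.2 ∧ coords.1 > actualcoords.1 then
      (PySem.List.pyRange (actualcoords.1 + 1) coords.1 1).foldl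
        (fun e idx => if pvTile ChessBoard idx (actualcoords.2 - actualcoords.1 + idx) ≠ "   " then false else e) true
    else E1
  let E3 := if coords.1 - actualcoords.1 = actualcoords.2 - coords.2 ∧ coords.1 < actualcoords.1 then
      (PySem.List.pyRange (coords.1 + 1) actualcoords.1 1).foldl
        (fun e idx => if pvTile ChessBoard idx (coords.2 + coords.1 - idx) ≠ "   " then false else e) true
    else E2
  let E4 := if coords.1 - actualcoords.1 = actualcoords.2 - coords.2 ∧ coords.1 > actualcoords.1 then
      (PySem.List.pyRange (actualcoords.1 + 1) coords.1 1).foldl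
        (fun e idx => if pvTile ChessBoard idx (actualcoords.2 + actualcoords.1 - idx) ≠ "   " then false else e) true
    else E3
  let E5 := if coords.1 < actualcoords.1 ∧ coords.2 = actualcoords.2 then
      (PySem.List.pyRange (coords.1 + 1) actualcoords.1 1).foldl
        (fun e idx => if pvTile ChessBoard idx actualcoords.2 ≠ "   " then false else e) true
    else E4
  let E6 := if coords.1 > actualcoords.1 ∧ coords.2 = actualcoords.2 then
      (PySem.List.pyRange (actualcoords.1 + 1) coords.1 1).foldl
        (fun e idx => if pvTile ChessBoard idx actualcoords.2 ≠ "   " then false else e) true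
    else E5
  let E7 := if coords.1 = actualcoords.1 ∧ coords.2 < actualcoords.2 then
      (PySem.List.pyRange (coords.2 + 1) actualcoords.2 1).foldl
        (fun e idx => if pvTile ChessBoard actualcoords.1 idx ≠ "   " then false else e) true
    else E6
  let E8 := if coords.1 = actualcoords.1 ∧ coords.2 > actualcoords.2 then
      (PySem.List.pyRange (actualcoords.2 + 1) coords.2 1).foldl
        (fun e idx => if pvTile ChessBoard actualcoords.1 idx ≠ "   " then false else e) true
    else E7
  if E8 = true then
    (pvPut (pvPut ChessBoard coords.1 coords.2 (pvTile ChessBoard actualcoords.1 actualcoords.2))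
        actualcoords.1 actualcoords.2 "   ", true)
  else (ChessBoard, Movedone)

-- ===== PORT B =====
-- _sign(d) = (d > 0) - (d < 0)
def pvSign (d : Int) : Int := (if 0 < d then 1 else 0) - (if d < 0 then 1 else 0)

def MoveQueen_alt (actualcoords : Int × Int) (coords : Int × Int) (ChessBoard : List (List String)) (Movedone : Bool) : List (List String) × Bool :=
  let ar := actualcoords.1
  let ac := actualcoords.2
  let tr := coords.1
  let tc := coords.2
  let dr := tr - ar
  let dc := tc - ac
  let sr : Int := pvSign dr
  let sc : Int := pvSign dc
  if (¬(dr = 0 ∧ dc = 0)) ∧ (dr = 0 ∨ dc = 0 ∨ dr.natAbs = dc.natAbs) then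
    let steps : Int := ((max dr.natAbs dc.natAbs : Nat) : Int)
    let clear := (PySem.List.pyRange 1 steps 1).foldl
      (fun e k => if pvTile ChessBoard (ar + k * sr) (ac + k * sc) ≠ "   " then false else e) true
    if clear = true then
      (pvPut (pvPut ChessBoard tr tc (pvTile ChessBoard ar ac)) ar ac "   ", true)
    else (ChessBoard, Movedone)
  else (ChessBoard, Movedone)

-- ===== PRECONDITION & SPEC =====
-- Python index r is valid for list xs of length n iff -n ≤ r < n; pvOkIdx checks both levels.
def pvOkIdx (b : List (List String)) (r c : Int) : Bool :=
  (decide (-(b.length : Int) ≤ r) && decide (r < (b.length : Int))) &&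
  (decide (-((PySem.List.pyGetD b r []).length : Int) ≤ c) && decide (c < ((PySem.List.pyGetD b r []).length : Int)))

-- Pre_ excludes exactly the inputs on which Python A raises IndexError: on a straight-line
-- move every scanned intermediate tile must be a valid index, and, when the whole path is
-- blank (so A performs the move), both endpoints must be valid indices too.
def Pre_MoveQueen (actualcoords : Int × Int) (coords : Int × Int) (ChessBoard : List (List String)) (Movedone : Bool) : Prop :=
  let ar := actualcoords.1
  let ac := actualcoords.2
  let dr := coords.1 - ar
  let dc := coords.2 - ac
  let sr : Int := pvSign dr
  let sc : Int := pvSign dc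
  let steps : Int := ((max dr.natAbs dc.natAbs : Nat) : Int)
  let scan := PySem.List.pyRange 1 steps 1
  ((¬(dr = 0 ∧ dc = 0)) ∧ (dr = 0 ∨ dc = 0 ∨ dr.natAbs = dc.natAbs)) →
    -- The size conjunct is implied by the validity conjunct (the scanned row/column
    -- indices are distinct, so more than 2·len of them cannot all be valid); it is
    -- stated so that the condition is cheap to decide and does not narrow Pre_.
    steps ≤ 2 * ((max ChessBoard.length (PySem.List.pyGetD ChessBoard ar []).length : Nat) : Int) + 1 ∧
    (∀ k ∈ scan, pvOkIdx ChessBoard (ar + k * sr) (ac + k * sc) = true) ∧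
    ((∀ k ∈ scan, pvTile ChessBoard (ar + k * sr) (ac + k * sc) = "   ") →
      pvOkIdx ChessBoard ar ac = true ∧ pvOkIdx ChessBoard coords.1 coords.2 = true)
instance (actualcoords : Int × Int) (coords : Int × Int) (ChessBoard : List (List String)) (Movedone : Bool) : Decidable (Pre_MoveQueen actualcoords coords ChessBoard Movedone) := by unfold Pre_MoveQueen pvSign; infer_instance

def pvWitness_MoveQueen : (Int × Int) × (Int × Int) × List (List String) × Bool :=
  ((0, 0), (2, 2), [["Q  ", "   ", "   "], ["   ", "   ", "   "], ["   ", "   ", "   "]], false)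

def Spec_MoveQueen (actualcoords : Int × Int) (coords : Int × Int) (ChessBoard : List (List String)) (Movedone : Bool) (out : List (List String) × Bool) : Prop := out = MoveQueen_alt actualcoords coords ChessBoard Movedone
instance (actualcoords : Int × Int) (coords : Int × Int) (ChessBoard : List (List String)) (Movedone : Bool) (out : List (List String) × Bool) : Decidable (Spec_MoveQueen actualcoords coords ChessBoard Movedone out) := by unfold Spec_MoveQueen; infer_instance

-- ===== CLAIM (what is proved, stated in full; the proofs are below) =====
def Claim_equal_MoveQueen : Prop := ∀ (actualcoords : Int × Int) (coords : Int × Int) (ChessBoard : List (List String)) (Movedone : Bool), Dom_MoveQueen actualcoords coords ChessBoard Movedone → Pre_MoveQueen actualcoords coords ChessBoard Movedone → Spec_MoveQueen actualcoords coords ChessBoard Movedone (MoveQueen actualcoords coords ChessBoard Movedone)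

-- ===== LEMMAS AND PROOFS =====

-- A's scan loop (never breaks, only latches False) computes "every tile on the list is blank".
theorem foldl_blank (g : Int → String) (l : List Int) (b : Bool) :
    l.foldl (fun e idx => if g idx ≠ "   " then false else e) b
      = (b && l.all (fun idx => decide (g idx = "   "))) := by
  induction l generalizing b with
  | nil => simp
  | cons x xs ih =>
      simp only [List.foldl_cons, List.all_cons, ih]
      by_cases h : g x = "   " <;> simp [h]

-- reindex an "all blank" scan over (a, a+s) by idx = a + k, k ∈ (0, s)
theorem all_shift_pos (g h : Int → Bool) (a s : Int)
    (hc : ∀ k, 1 ≤ k → k < s → h k = g (a + k)) :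
    (PySem.List.pyRange (a + 1) (a + s) 1).all g = (PySem.List.pyRange 1 s 1).all h := by
  apply Bool.coe_iff_coe.mp
  simp only [List.all_eq_true, PySem.List.mem_pyRange_one]
  constructor
  · intro H k hk
    rw [hc k hk.1 hk.2]
    exact H _ ⟨by omega, by omega⟩
  · intro H i hi
    have h2 := H (i - a) ⟨by omega, by omega⟩
    rw [hc _ (by omega) (by omega)] at h2
    have e : a + (i - a) = i := by ring
    rwa [e] at h2

-- reindex an "all blank" scan over (a-s, a) by idx = a - k, k ∈ (0, s)
theorem all_shift_neg (g h : Int → Bool) (a s : Int)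
    (hc : ∀ k, 1 ≤ k → k < s → h k = g (a - k)) :
    (PySem.List.pyRange (a - s + 1) a 1).all g = (PySem.List.pyRange 1 s 1).all h := by
  apply Bool.coe_iff_coe.mp
  simp only [List.all_eq_true, PySem.List.mem_pyRange_one]
  constructor
  · intro H k hk
    rw [hc k hk.1 hk.2]
    exact H _ ⟨by omega, by omega⟩
  · intro H i hi
    have h2 := H (a - i) ⟨by omega, by omega⟩
    rw [hc _ (by omega) (by omega)] at h2
    have e : a - (a - i) = i := by ring
    rwa [e] at h2

theorem pv_main (ar ac tr tc : Int) (B : List (List String)) (M : Bool) :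
    MoveQueen (ar, ac) (tr, tc) B M = MoveQueen_alt (ar, ac) (tr, tc) B M := by
  simp only [MoveQueen, MoveQueen_alt]
  by_cases hd1 : tr - ar = tc - ac ∧ tr < ar
  · have hsr : pvSign (tr - ar) = -1 := by unfold pvSign; split_ifs <;> omega
    have hsc : pvSign (tc - ac) = -1 := by unfold pvSign; split_ifs <;> omega
    have hst : ((max (tr - ar).natAbs (tc - ac).natAbs : Nat) : Int) = ar - tr := by omega
    simp only [hsr, hsc, hst]
    rw [if_pos hd1,
        if_neg (show ¬(tr - ar = tc - ac ∧ tr > ar) by omega),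
        if_neg (show ¬(tr - ar = ac - tc ∧ tr < ar) by omega),
        if_neg (show ¬(tr - ar = ac - tc ∧ tr > ar) by omega),
        if_neg (show ¬(tr < ar ∧ tc = ac) by omega),
        if_neg (show ¬(tr > ar ∧ tc = ac) by omega),
        if_neg (show ¬(tr = ar ∧ tc < ac) by omega),
        if_neg (show ¬(tr = ar ∧ tc > ac) by omega),
        if_pos (show (¬(tr - ar = 0 ∧ tc - ac = 0)) ∧ (tr - ar = 0 ∨ tc - ac = 0 ∨ (tr - ar).natAbs = (tc - ac).natAbs) by omega)]
    rw [foldl_blank (fun idx => pvTile B idx (tc - tr + idx)),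
        foldl_blank (fun k => pvTile B (ar + k * -1) (ac + k * -1))]
    simp only [Bool.true_and]
    rw [show PySem.List.pyRange (tr + 1) ar 1 = PySem.List.pyRange (ar - (ar - tr) + 1) ar 1 by congr 1; ring]
    rw [all_shift_neg _ (fun k => decide (pvTile B (ar + k * -1) (ac + k * -1) = "   ")) ar (ar - tr)
        (by intro k hk1 hk2
            have e1 : ar + k * -1 = ar - k := by ring
            have e2 : ac + k * -1 = tc - tr + (ar - k) := by omega
            simp only [e1, e2])]
  by_cases hd2 : tr - ar = tc - ac ∧ tr > ar
  · have hsr : pvSign (tr - ar) = 1 := by unfold pvSign; split_ifs <;> omega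
    have hsc : pvSign (tc - ac) = 1 := by unfold pvSign; split_ifs <;> omega
    have hst : ((max (tr - ar).natAbs (tc - ac).natAbs : Nat) : Int) = tr - ar := by omega
    simp only [hsr, hsc, hst]
    rw [if_pos hd2,
        if_neg (show ¬(tr - ar = ac - tc ∧ tr < ar) by omega),
        if_neg (show ¬(tr - ar = ac - tc ∧ tr > ar) by omega),
        if_neg (show ¬(tr < ar ∧ tc = ac) by omega),
        if_neg (show ¬(tr > ar ∧ tc = ac) by omega),
        if_neg (show ¬(tr = ar ∧ tc < ac) by omega),
        if_neg (show ¬(tr = ar ∧ tc > ac) by omega),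
        if_pos (show (¬(tr - ar = 0 ∧ tc - ac = 0)) ∧ (tr - ar = 0 ∨ tc - ac = 0 ∨ (tr - ar).natAbs = (tc - ac).natAbs) by omega)]
    rw [foldl_blank (fun idx => pvTile B idx (ac - ar + idx)),
        foldl_blank (fun k => pvTile B (ar + k * 1) (ac + k * 1))]
    simp only [Bool.true_and]
    rw [show PySem.List.pyRange (ar + 1) tr 1 = PySem.List.pyRange (ar + 1) (ar + (tr - ar)) 1 by congr 1; ring]
    rw [all_shift_pos _ (fun k => decide (pvTile B (ar + k * 1) (ac + k * 1) = "   ")) ar (tr - ar)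
        (by intro k hk1 hk2
            have e1 : ar + k * 1 = ar + k := by ring
            have e2 : ac + k * 1 = ac - ar + (ar + k) := by ring
            simp only [e1, e2])]
  by_cases hd3 : tr - ar = ac - tc ∧ tr < ar
  · have hsr : pvSign (tr - ar) = -1 := by unfold pvSign; split_ifs <;> omega
    have hsc : pvSign (tc - ac) = 1 := by unfold pvSign; split_ifs <;> omega
    have hst : ((max (tr - ar).natAbs (tc - ac).natAbs : Nat) : Int) = ar - tr := by omega
    simp only [hsr, hsc, hst]
    rw [if_pos hd3,
        if_neg (show ¬(tr - ar = ac - tc ∧ tr > ar) by omega),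
        if_neg (show ¬(tr < ar ∧ tc = ac) by omega),
        if_neg (show ¬(tr > ar ∧ tc = ac) by omega),
        if_neg (show ¬(tr = ar ∧ tc < ac) by omega),
        if_neg (show ¬(tr = ar ∧ tc > ac) by omega),
        if_pos (show (¬(tr - ar = 0 ∧ tc - ac = 0)) ∧ (tr - ar = 0 ∨ tc - ac = 0 ∨ (tr - ar).natAbs = (tc - ac).natAbs) by omega)]
    rw [foldl_blank (fun idx => pvTile B idx (tc + tr - idx)),
        foldl_blank (fun k => pvTile B (ar + k * -1) (ac + k * 1))]
    simp only [Bool.true_and]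
    rw [show PySem.List.pyRange (tr + 1) ar 1 = PySem.List.pyRange (ar - (ar - tr) + 1) ar 1 by congr 1; ring]
    rw [all_shift_neg _ (fun k => decide (pvTile B (ar + k * -1) (ac + k * 1) = "   ")) ar (ar - tr)
        (by intro k hk1 hk2
            have e1 : ar + k * -1 = ar - k := by ring
            have e2 : ac + k * 1 = tc + tr - (ar - k) := by omega
            simp only [e1, e2])]
  by_cases hd4 : tr - ar = ac - tc ∧ tr > ar
  · have hsr : pvSign (tr - ar) = 1 := by unfold pvSign; split_ifs <;> omega
    have hsc : pvSign (tc - ac) = -1 := by unfold pvSign; split_ifs <;> omega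
    have hst : ((max (tr - ar).natAbs (tc - ac).natAbs : Nat) : Int) = tr - ar := by omega
    simp only [hsr, hsc, hst]
    rw [if_pos hd4,
        if_neg (show ¬(tr < ar ∧ tc = ac) by omega),
        if_neg (show ¬(tr > ar ∧ tc = ac) by omega),
        if_neg (show ¬(tr = ar ∧ tc < ac) by omega),
        if_neg (show ¬(tr = ar ∧ tc > ac) by omega),
        if_pos (show (¬(tr - ar = 0 ∧ tc - ac = 0)) ∧ (tr - ar = 0 ∨ tc - ac = 0 ∨ (tr - ar).natAbs = (tc - ac).natAbs) by omega)]
    rw [foldl_blank (fun idx => pvTile B idx (ac + ar - idx)),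
        foldl_blank (fun k => pvTile B (ar + k * 1) (ac + k * -1))]
    simp only [Bool.true_and]
    rw [show PySem.List.pyRange (ar + 1) tr 1 = PySem.List.pyRange (ar + 1) (ar + (tr - ar)) 1 by congr 1; ring]
    rw [all_shift_pos _ (fun k => decide (pvTile B (ar + k * 1) (ac + k * -1) = "   ")) ar (tr - ar)
        (by intro k hk1 hk2
            have e1 : ar + k * 1 = ar + k := by ring
            have e2 : ac + k * -1 = ac + ar - (ar + k) := by ring
            simp only [e1, e2])]
  by_cases hv5 : tr < ar ∧ tc = ac
  · have hsr : pvSign (tr - ar) = -1 := by unfold pvSign; split_ifs <;> omega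
    have hsc : pvSign (tc - ac) = 0 := by unfold pvSign; split_ifs <;> omega
    have hst : ((max (tr - ar).natAbs (tc - ac).natAbs : Nat) : Int) = ar - tr := by omega
    simp only [hsr, hsc, hst]
    rw [if_pos hv5,
        if_neg (show ¬(tr > ar ∧ tc = ac) by omega),
        if_neg (show ¬(tr = ar ∧ tc < ac) by omega),
        if_neg (show ¬(tr = ar ∧ tc > ac) by omega),
        if_pos (show (¬(tr - ar = 0 ∧ tc - ac = 0)) ∧ (tr - ar = 0 ∨ tc - ac = 0 ∨ (tr - ar).natAbs = (tc - ac).natAbs) by omega)]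
    rw [foldl_blank (fun idx => pvTile B idx ac),
        foldl_blank (fun k => pvTile B (ar + k * -1) (ac + k * 0))]
    simp only [Bool.true_and]
    rw [show PySem.List.pyRange (tr + 1) ar 1 = PySem.List.pyRange (ar - (ar - tr) + 1) ar 1 by congr 1; ring]
    rw [all_shift_neg _ (fun k => decide (pvTile B (ar + k * -1) (ac + k * 0) = "   ")) ar (ar - tr)
        (by intro k hk1 hk2
            have e1 : ar + k * -1 = ar - k := by ring
            have e2 : ac + k * 0 = ac := by ring
            simp only [e1, e2])]
  by_cases hv6 : tr > ar ∧ tc = ac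
  · have hsr : pvSign (tr - ar) = 1 := by unfold pvSign; split_ifs <;> omega
    have hsc : pvSign (tc - ac) = 0 := by unfold pvSign; split_ifs <;> omega
    have hst : ((max (tr - ar).natAbs (tc - ac).natAbs : Nat) : Int) = tr - ar := by omega
    simp only [hsr, hsc, hst]
    rw [if_pos hv6,
        if_neg (show ¬(tr = ar ∧ tc < ac) by omega),
        if_neg (show ¬(tr = ar ∧ tc > ac) by omega),
        if_pos (show (¬(tr - ar = 0 ∧ tc - ac = 0)) ∧ (tr - ar = 0 ∨ tc - ac = 0 ∨ (tr - ar).natAbs = (tc - ac).natAbs) by omega)]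
    rw [foldl_blank (fun idx => pvTile B idx ac),
        foldl_blank (fun k => pvTile B (ar + k * 1) (ac + k * 0))]
    simp only [Bool.true_and]
    rw [show PySem.List.pyRange (ar + 1) tr 1 = PySem.List.pyRange (ar + 1) (ar + (tr - ar)) 1 by congr 1; ring]
    rw [all_shift_pos _ (fun k => decide (pvTile B (ar + k * 1) (ac + k * 0) = "   ")) ar (tr - ar)
        (by intro k hk1 hk2
            have e1 : ar + k * 1 = ar + k := by ring
            have e2 : ac + k * 0 = ac := by ring
            simp only [e1, e2])]
  by_cases hh7 : tr = ar ∧ tc < ac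
  · have hsr : pvSign (tr - ar) = 0 := by unfold pvSign; split_ifs <;> omega
    have hsc : pvSign (tc - ac) = -1 := by unfold pvSign; split_ifs <;> omega
    have hst : ((max (tr - ar).natAbs (tc - ac).natAbs : Nat) : Int) = ac - tc := by omega
    simp only [hsr, hsc, hst]
    rw [if_pos hh7,
        if_neg (show ¬(tr = ar ∧ tc > ac) by omega),
        if_pos (show (¬(tr - ar = 0 ∧ tc - ac = 0)) ∧ (tr - ar = 0 ∨ tc - ac = 0 ∨ (tr - ar).natAbs = (tc - ac).natAbs) by omega)]
    rw [foldl_blank (fun idx => pvTile B ar idx),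
        foldl_blank (fun k => pvTile B (ar + k * 0) (ac + k * -1))]
    simp only [Bool.true_and]
    rw [show PySem.List.pyRange (tc + 1) ac 1 = PySem.List.pyRange (ac - (ac - tc) + 1) ac 1 by congr 1; ring]
    rw [all_shift_neg _ (fun k => decide (pvTile B (ar + k * 0) (ac + k * -1) = "   ")) ac (ac - tc)
        (by intro k hk1 hk2
            have e1 : ar + k * 0 = ar := by ring
            have e2 : ac + k * -1 = ac - k := by ring
            simp only [e1, e2])]
  by_cases hh8 : tr = ar ∧ tc > ac
  · have hsr : pvSign (tr - ar) = 0 := by unfold pvSign; split_ifs <;> omega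
    have hsc : pvSign (tc - ac) = 1 := by unfold pvSign; split_ifs <;> omega
    have hst : ((max (tr - ar).natAbs (tc - ac).natAbs : Nat) : Int) = tc - ac := by omega
    simp only [hsr, hsc, hst]
    rw [if_pos hh8,
        if_pos (show (¬(tr - ar = 0 ∧ tc - ac = 0)) ∧ (tr - ar = 0 ∨ tc - ac = 0 ∨ (tr - ar).natAbs = (tc - ac).natAbs) by omega)]
    rw [foldl_blank (fun idx => pvTile B ar idx),
        foldl_blank (fun k => pvTile B (ar + k * 0) (ac + k * 1))]
    simp only [Bool.true_and]
    rw [show PySem.List.pyRange (ac + 1) tc 1 = PySem.List.pyRange (ac + 1) (ac + (tc - ac)) 1 by congr 1; ring]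
    rw [all_shift_pos _ (fun k => decide (pvTile B (ar + k * 0) (ac + k * 1) = "   ")) ac (tc - ac)
        (by intro k hk1 hk2
            have e1 : ar + k * 0 = ar := by ring
            have e2 : ac + k * 1 = ac + k := by ring
            simp only [e1, e2])]
  · rw [if_neg hd1, if_neg hd2, if_neg hd3, if_neg hd4, if_neg hv5, if_neg hv6, if_neg hh7, if_neg hh8,
        if_neg (show ¬((¬(tr - ar = 0 ∧ tc - ac = 0)) ∧ (tr - ar = 0 ∨ tc - ac = 0 ∨ (tr - ar).natAbs = (tc - ac).natAbs)) by omega)]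
    simp

-- ===== VERDICT (by name: the statement is the Claim_ definition above) =====
theorem MoveQueen_spec : Claim_equal_MoveQueen := by
  intro acs cs B M _ _
  unfold Spec_MoveQueen
  obtain ⟨ar, ac⟩ := acs
  obtain ⟨tr, tc⟩ := cs
  exact pv_main ar ac tr tc B M
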